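-- pv_equiv track=rewrite | github.com/Viddlox/skyscrapper-solver-ultima | src/skyscraper/grid_manager.py | count_visible_up_to_position_reverse
-- ===== SOURCE A (Python) =====
-- def count_visible_up_to_position_reverse(perm: "Permutation", start_pos: int) -> int:
--     visible, max_height = 0, 0
--     for i in range(len(perm) - 1, start_pos - 1, -1):
--         height = perm[i]
--         if height > max_height:
--             visible += 1
--             max_height = height
--     return visible
-- ===== SOURCE B (Python) =====
-- def count_visible_up_to_position_reverse(perm, start_pos):
--     heights = [perm[i] for i in range(len(perm) - 1, start_pos - 1, -1)]
--     maxes = [0]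
--     for h in heights:
--         maxes.append(max(maxes[-1], h))
--     return sum(1 for h, m in zip(heights, maxes) if h > m)
-- ===== Notes on version B (the rewrite author's own statement) =====
-- stated objective: alternative
-- what changed: Replaces the inline running-max loop by three phases: materialise the scanned heights, build a prefix-maximum table, then count heights exceeding their preceding prefix max.
import Mathlib
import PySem

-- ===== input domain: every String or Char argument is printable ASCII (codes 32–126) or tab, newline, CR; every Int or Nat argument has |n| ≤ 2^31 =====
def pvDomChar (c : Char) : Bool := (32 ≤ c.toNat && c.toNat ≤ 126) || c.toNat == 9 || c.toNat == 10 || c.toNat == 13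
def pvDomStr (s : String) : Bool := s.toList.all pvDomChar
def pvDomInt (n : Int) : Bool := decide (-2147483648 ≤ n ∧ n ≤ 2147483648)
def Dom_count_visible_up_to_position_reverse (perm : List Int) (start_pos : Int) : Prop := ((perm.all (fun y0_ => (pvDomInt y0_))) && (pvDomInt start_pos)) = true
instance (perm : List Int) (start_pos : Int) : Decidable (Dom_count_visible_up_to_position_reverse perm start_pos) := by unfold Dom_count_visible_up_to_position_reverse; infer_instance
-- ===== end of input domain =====

-- B replaces A's inline running-max accumulator by three explicit phases (collect heights,
-- build a prefix-max table, count exceedances); same cost, different decomposition.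

-- ===== PORT A =====
-- for i in range(len(perm)-1, start_pos-1, -1): update (visible, max_height)
def count_visible_up_to_position_reverse (perm : List Int) (start_pos : Int) : Int :=
  ((PySem.List.pyRange ((perm.length : Int) - 1) (start_pos - 1) (-1)).foldl
    (fun (st : Int × Int) i =>
      let height := PySem.List.pyGetD perm i 0   -- perm[i]; in range under Pre_
      if height > st.2 then (st.1 + 1, height) else st)
    (0, 0)).1

-- ===== PORT B =====
def count_visible_up_to_position_reverse_alt (perm : List Int) (start_pos : Int) : Int :=
  let heights := (PySem.List.pyRange ((perm.length : Int) - 1) (start_pos - 1) (-1)).map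
    (fun i => PySem.List.pyGetD perm i 0)        -- perm[i]; in range under Pre_
  let maxes := heights.foldl (fun acc h => acc ++ [max (acc.getLastD 0) h]) [0]
  (heights.zip maxes).foldl (fun (s : Int) p => if p.1 > p.2 then s + 1 else s) 0

-- ===== PRECONDITION & SPEC =====
-- Pre_ excludes exactly the inputs where Python's perm[i] raises IndexError: start_pos < -len(perm).
def Pre_count_visible_up_to_position_reverse (perm : List Int) (start_pos : Int) : Prop :=
  -(perm.length : Int) ≤ start_pos
instance (perm : List Int) (start_pos : Int) : Decidable (Pre_count_visible_up_to_position_reverse perm start_pos) := by unfold Pre_count_visible_up_to_position_reverse; infer_instance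
def pvWitness_count_visible_up_to_position_reverse : List Int × Int := ([3, 1, 2], 0)

def Spec_count_visible_up_to_position_reverse (perm : List Int) (start_pos : Int) (out : Int) : Prop := out = count_visible_up_to_position_reverse_alt perm start_pos
instance (perm : List Int) (start_pos : Int) (out : Int) : Decidable (Spec_count_visible_up_to_position_reverse perm start_pos out) := by unfold Spec_count_visible_up_to_position_reverse; infer_instance

-- ===== CLAIM (what is proved, stated in full; the proofs are below) =====
def Claim_equal_count_visible_up_to_position_reverse : Prop := ∀ (perm : List Int) (start_pos : Int), Dom_count_visible_up_to_position_reverse perm start_pos → Pre_count_visible_up_to_position_reverse perm start_pos → Spec_count_visible_up_to_position_reverse perm start_pos (count_visible_up_to_position_reverse perm start_pos)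

-- ===== LEMMAS AND PROOFS =====

-- Proof-side recursive characterisation of B's prefix-max table.
def pvMaxesFrom (m : Int) : List Int → List Int
  | [] => []
  | h :: t => max m h :: pvMaxesFrom (max m h) t

lemma pvMaxes_fold (hs : List Int) : ∀ (pre : List Int) (m : Int),
    hs.foldl (fun acc h => acc ++ [max (acc.getLastD 0) h]) (pre ++ [m])
      = (pre ++ [m]) ++ pvMaxesFrom m hs := by
  induction hs with
  | nil => simp [pvMaxesFrom]
  | cons h t ih =>
    intro pre m
    have : (pre ++ [m]).getLastD 0 = m := by simp
    simp only [List.foldl_cons, this, pvMaxesFrom]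
    rw [List.append_assoc pre [m] [max m h]]
    have := ih (pre ++ [m]) (max m h)
    simpa [List.append_assoc] using this

lemma pvCount_eq (hs : List Int) : ∀ (v m : Int),
    (hs.foldl (fun (st : Int × Int) h => if h > st.2 then (st.1 + 1, h) else st) (v, m)).1
      = (hs.zip (m :: pvMaxesFrom m hs)).foldl
          (fun (s : Int) p => if p.1 > p.2 then s + 1 else s) v := by
  induction hs with
  | nil => simp
  | cons h t ih =>
    intro v m
    simp only [pvMaxesFrom, List.zip_cons_cons, List.foldl_cons]
    by_cases hcmp : h > m
    · have hm : max m h = h := by omega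
      simp only [hcmp, hm]
      exact ih (v + 1) h
    · have hm : max m h = m := by omega
      simp only [hcmp, hm]
      exact ih v m

-- ===== VERDICT (by name: the statement is the Claim_ definition above) =====
theorem count_visible_up_to_position_reverse_spec : Claim_equal_count_visible_up_to_position_reverse := by
  intro perm start_pos _ _
  unfold Spec_count_visible_up_to_position_reverse
  unfold count_visible_up_to_position_reverse count_visible_up_to_position_reverse_alt
  set hs := (PySem.List.pyRange ((perm.length : Int) - 1) (start_pos - 1) (-1)).map
    (fun i => PySem.List.pyGetD perm i 0) with hhs
  have hmax : hs.foldl (fun acc h => acc ++ [max (acc.getLastD 0) h]) [0]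
      = [0] ++ pvMaxesFrom 0 hs := by
    simpa using pvMaxes_fold hs [] 0
  simp only [hmax, List.singleton_append]
  rw [← pvCount_eq hs 0 0, hhs, List.foldl_map]
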